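-- pv_equiv track=rewrite | github.com/Catsuko/algo-design-backtracking | stacking_shapes.py | smallest_continuous_area
-- ===== SOURCE A (Python) =====
-- def smallest_continuous_area(points):
--     smallest = len(points)
--     points_to_check = points.copy()
--     while len(points_to_check) > 0:
--         connected = []
--         fill_connected(points_to_check[0], connected, points)
--         smallest = min(smallest, len(connected))
--         [points_to_check.remove(p) for p in connected if p in points_to_check]
--     return smallest
--
-- def fill_connected(p, connected, points):
--     connected.append(p)
--     neighbours = [(x, y) for x, y in points if abs(x - p[0]) + abs(y - p[1]) == 1]
--     for n in neighbours:
--         if n not in connected: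
--             fill_connected(n, connected, points)
-- ===== SOURCE B (Python) =====
-- def smallest_continuous_area(points):
--     distinct = list(dict.fromkeys(points))
--     best = len(points)
--     remaining = distinct
--     while remaining:
--         p = remaining[0]
--         comp = [p]
--         frontier = [p]
--         rest = [q for q in distinct if q != p]
--         while frontier:
--             new = [q for q in rest
--                    if any(abs(q[0] - r[0]) + abs(q[1] - r[1]) == 1 for r in frontier)]
--             rest = [q for q in rest if q not in new]
--             comp = comp + new
--             frontier = new
--         best = min(best, len(comp))
--         remaining = [q for q in remaining if q not in comp]
--     return best
-- ===== Notes on version B (the rewrite author's own statement) =====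
-- stated objective: alternative
-- what changed: Replaced A's recursive DFS flood-fill with in-place worklist mutation by a dedup of the points followed by an iterative layered-BFS closure per component over immutable lists.
import Mathlib
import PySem

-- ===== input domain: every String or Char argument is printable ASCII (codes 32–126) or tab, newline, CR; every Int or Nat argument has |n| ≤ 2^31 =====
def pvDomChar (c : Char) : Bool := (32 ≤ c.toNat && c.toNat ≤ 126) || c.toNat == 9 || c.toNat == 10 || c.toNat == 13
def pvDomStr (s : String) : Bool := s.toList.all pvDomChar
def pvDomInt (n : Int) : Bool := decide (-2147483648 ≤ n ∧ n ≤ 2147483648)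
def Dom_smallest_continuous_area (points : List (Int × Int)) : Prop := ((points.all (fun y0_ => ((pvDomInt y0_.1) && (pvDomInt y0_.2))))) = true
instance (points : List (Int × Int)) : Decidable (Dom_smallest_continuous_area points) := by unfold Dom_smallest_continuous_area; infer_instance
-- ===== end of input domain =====

-- B replaces A's recursive DFS flood-fill with worklist mutation by dedup + an iterative
-- layered-BFS closure per component over immutable lists (objective: alternative algorithm).

-- ===== PORT A =====
-- fill_connected, functional: returns the grown `connected` list; fuel makes the
-- recursion total (with fuel > |points| it is never exhausted, proved below).
def pvFillA : Nat → (Int × Int) → List (Int × Int) → List (Int × Int) → List (Int × Int)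
  | 0, _, c, _ => c
  | f+1, p, c, pts =>
    let c1 := c ++ [p]
    let ns := pts.filter (fun q => (q.1 - p.1).natAbs + (q.2 - p.2).natAbs == 1)
    ns.foldl (fun acc n => if n ∈ acc then acc else pvFillA f n acc pts) c1

-- while points_to_check: … ; fuel = initial length (each pass removes points_to_check[0]).
def pvLoopA : Nat → Int → List (Int × Int) → List (Int × Int) → Int
  | 0, s, _, _ => s
  | f+1, s, ptc, pts =>
    match ptc with
    | [] => s
    | p0 :: _ =>
      let conn := pvFillA (pts.length + 1) p0 [] pts
      let s' := min s (conn.length : Int)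
      -- [points_to_check.remove(p) for p in connected if p in points_to_check]
      let ptc' := conn.foldl (fun l p => if p ∈ l then (PySem.List.remove? l p).getD l else l) ptc
      pvLoopA f s' ptc' pts

def smallest_continuous_area (points : List (Int × Int)) : Int :=
  pvLoopA points.length (points.length : Int) points points

-- ===== PORT B =====
-- any(abs(q0-r0)+abs(q1-r1)==1 for r in frontier)
def pvAdjAny (frontier : List (Int × Int)) (q : Int × Int) : Bool :=
  frontier.any (fun r => (q.1 - r.1).natAbs + (q.2 - r.2).natAbs == 1)

-- inner while frontier: … ; fuel = |rest| + 2 (each productive layer shrinks rest).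
def pvBfsB : Nat → List (Int × Int) → List (Int × Int) → List (Int × Int) → List (Int × Int)
  | 0, comp, _, _ => comp
  | f+1, comp, frontier, rest =>
    if frontier.isEmpty then comp
    else
      let nw := rest.filter (pvAdjAny frontier)
      pvBfsB f (comp ++ nw) nw (rest.filter (fun q => !(decide (q ∈ nw))))

def pvCompB (p : Int × Int) (distinct : List (Int × Int)) : List (Int × Int) :=
  let rest := distinct.filter (fun q => !(decide (q = p)))
  pvBfsB (rest.length + 2) [p] [p] rest

-- outer while remaining: … ; fuel = |distinct| (each pass removes remaining[0]).
def pvLoopB : Nat → Int → List (Int × Int) → List (Int × Int) → Int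
  | 0, s, _, _ => s
  | f+1, s, remaining, distinct =>
    match remaining with
    | [] => s
    | p0 :: _ =>
      let comp := pvCompB p0 distinct
      pvLoopB f (min s (comp.length : Int)) (remaining.filter (fun q => !(decide (q ∈ comp)))) distinct

def smallest_continuous_area_alt (points : List (Int × Int)) : Int :=
  let distinct := PySem.List.dedup points   -- list(dict.fromkeys(points))
  pvLoopB distinct.length (points.length : Int) distinct distinct

-- ===== PRECONDITION & SPEC =====
def Spec_smallest_continuous_area (points : List (Int × Int)) (out : Int) : Prop := out = smallest_continuous_area_alt points
instance (points : List (Int × Int)) (out : Int) : Decidable (Spec_smallest_continuous_area points out) := by unfold Spec_smallest_continuous_area; infer_instance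

-- ===== CLAIM (what is proved, stated in full; the proofs are below) =====
def Claim_equal_smallest_continuous_area : Prop := ∀ (points : List (Int × Int)), Dom_smallest_continuous_area points → Spec_smallest_continuous_area points (smallest_continuous_area points)

-- ===== LEMMAS AND PROOFS =====

-- orthogonal adjacency, and reachability through the point list
def pvAdj (a b : Int × Int) : Prop := (b.1 - a.1).natAbs + (b.2 - a.2).natAbs = 1

def pvStep (pts : List (Int × Int)) (a b : Int × Int) : Prop := b ∈ pts ∧ pvAdj a b

def pvReach (pts : List (Int × Int)) (a b : Int × Int) : Prop :=
  Relation.ReflTransGen (pvStep pts) a b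

theorem pvAdj_symm {a b : Int × Int} (h : pvAdj a b) : pvAdj b a := by
  unfold pvAdj at *; omega

-- endpoints of reach lie in pts (except possibly the start)
theorem pvReach_mem {pts : List (Int × Int)} {a b : Int × Int}
    (h : pvReach pts a b) : b = a ∨ b ∈ pts := by
  induction h with
  | refl => exact Or.inl rfl
  | tail _ h2 _ => exact Or.inr h2.1

theorem pvReach_symm {pts : List (Int × Int)} {a b : Int × Int}
    (ha : a ∈ pts) (h : pvReach pts a b) : pvReach pts b a := by
  induction h with
  | refl => exact Relation.ReflTransGen.refl
  | @tail c d h1 h2 ih =>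
    have hc : c ∈ pts := by
      rcases pvReach_mem h1 with h | h
      · rwa [h]
      · exact h
    exact Relation.ReflTransGen.trans
      (Relation.ReflTransGen.single ⟨hc, pvAdj_symm h2.2⟩) ih

theorem pvReach_congr {pts pts' : List (Int × Int)} (hm : ∀ x, x ∈ pts ↔ x ∈ pts')
    {a b : Int × Int} (h : pvReach pts a b) : pvReach pts' a b := by
  induction h with
  | refl => exact Relation.ReflTransGen.refl
  | tail _ h2 ih => exact Relation.ReflTransGen.tail ih ⟨(hm _).1 h2.1, h2.2⟩

-- count of distinct points not yet collected (the fuel measure)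
def pvM (pts c : List (Int × Int)) : Nat :=
  (pts.filter (fun x => !(decide (x ∈ c)))).length

theorem pvM_anti {pts c c' : List (Int × Int)} (h : ∀ x, x ∈ c → x ∈ c') :
    pvM pts c' ≤ pvM pts c := by
  apply List.Sublist.length_le
  apply List.monotone_filter_right
  intro a ha
  simp only [Bool.not_eq_eq_eq_not, Bool.not_true, decide_eq_false_iff_not] at *
  exact fun hc => ha (h a hc)

theorem pvM_lt {pts c : List (Int × Int)} {p : Int × Int} (hp : p ∈ pts) (hpc : p ∉ c) :
    pvM pts (c ++ [p]) < pvM pts c := by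
  have hsub : List.Sublist (pts.filter (fun x => !(decide (x ∈ c ++ [p]))))
      (pts.filter (fun x => !(decide (x ∈ c)))) := by
    apply List.monotone_filter_right
    intro a ha
    simp only [Bool.not_eq_eq_eq_not, Bool.not_true, decide_eq_false_iff_not, List.mem_append] at *
    exact fun hc => ha (Or.inl hc)
  rcases Nat.lt_or_ge (((pts.filter (fun x => !(decide (x ∈ c ++ [p]))))).length)
      (((pts.filter (fun x => !(decide (x ∈ c))))).length) with h | h
  · exact h
  · exfalso
    have heq := hsub.eq_of_length (Nat.le_antisymm hsub.length_le h)
    have hp1 : p ∈ pts.filter (fun x => !(decide (x ∈ c))) := by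
      simp [hp, hpc]
    rw [← heq] at hp1
    simp at hp1

-- invariant carried through the neighbour fold of pvFillA
def pvInv (pts : List (Int × Int)) (p : Int × Int) (c acc : List (Int × Int)) : Prop :=
  acc.Nodup ∧ ((c ++ [p]) <+: acc) ∧ (∀ x ∈ acc, x ∈ c ∨ pvReach pts p x) ∧
  (∀ x ∈ acc, x ∉ c → x ≠ p → ∀ y, pvStep pts x y → y ∈ acc)

theorem pvFillA_fold (pts : List (Int × Int)) (p : Int × Int) (c : List (Int × Int)) (f : Nat)
    (hp : p ∈ pts) (hpc : p ∉ c) (hmc : pvM pts c < f + 1)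
    (IH : ∀ (p' : Int × Int) (c' : List (Int × Int)),
      p' ∈ pts → p' ∉ c' → c'.Nodup → pvM pts c' < f →
      (c' <+: pvFillA f p' c' pts) ∧ (pvFillA f p' c' pts).Nodup ∧ p' ∈ pvFillA f p' c' pts ∧
      (∀ x ∈ pvFillA f p' c' pts, x ∈ c' ∨ pvReach pts p' x) ∧
      (∀ x ∈ pvFillA f p' c' pts, x ∉ c' → ∀ y, pvStep pts x y → y ∈ pvFillA f p' c' pts)) :
    ∀ (l acc : List (Int × Int)), (∀ n ∈ l, pvStep pts p n) → pvInv pts p c acc →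
    (acc <+: l.foldl (fun acc n => if n ∈ acc then acc else pvFillA f n acc pts) acc) ∧
    pvInv pts p c (l.foldl (fun acc n => if n ∈ acc then acc else pvFillA f n acc pts) acc) ∧
    (∀ n ∈ l, n ∈ l.foldl (fun acc n => if n ∈ acc then acc else pvFillA f n acc pts) acc) := by
  intro l
  induction l with
  | nil => exact fun acc _ hinv => ⟨List.prefix_rfl, hinv, by simp⟩
  | cons n l ihl =>
    intro acc hstep hinv
    obtain ⟨hnd, hpre, hsound, hclosed⟩ := hinv
    simp only [List.foldl_cons]
    by_cases hn : n ∈ acc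
    · rw [if_pos hn]
      obtain ⟨hpre', hinv', hmem'⟩ := ihl acc (fun m hm => hstep m (List.mem_cons_of_mem _ hm))
        ⟨hnd, hpre, hsound, hclosed⟩
      refine ⟨hpre', hinv', ?_⟩
      intro m hm
      rcases List.mem_cons.1 hm with rfl | hm
      · exact hpre'.sublist.mem hn
      · exact hmem' m hm
    · rw [if_neg hn]
      have hnstep := hstep n List.mem_cons_self
      have hmacc : pvM pts acc < f := by
        have h1 : pvM pts acc ≤ pvM pts (c ++ [p]) :=
          pvM_anti (fun x hx => hpre.sublist.mem hx)
        have h2 : pvM pts (c ++ [p]) < pvM pts c := pvM_lt hp hpc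
        omega
      obtain ⟨hpreF, hndF, hnF, hsoundF, hclosedF⟩ := IH n acc hnstep.1 hn hnd hmacc
      set acc' := pvFillA f n acc pts with hacc'
      have hinv' : pvInv pts p c acc' := by
        refine ⟨hndF, hpre.trans hpreF, ?_, ?_⟩
        · intro x hx
          rcases hsoundF x hx with hx' | hrx
          · exact hsound x hx'
          · exact Or.inr (Relation.ReflTransGen.trans
              (Relation.ReflTransGen.single hnstep) hrx)
        · intro x hx hxc hxp y hy
          by_cases hxacc : x ∈ acc
          · exact hpreF.sublist.mem (hclosed x hxacc hxc hxp y hy)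
          · exact hclosedF x hx hxacc y hy
      obtain ⟨hpre', hinv'', hmem'⟩ := ihl acc'
        (fun m hm => hstep m (List.mem_cons_of_mem _ hm)) hinv'
      refine ⟨(hpreF.trans hpre'), hinv'', ?_⟩
      intro m hm
      rcases List.mem_cons.1 hm with rfl | hm
      · exact hpre'.sublist.mem hnF
      · exact hmem' m hm

-- DFS (pvFillA) correctness
theorem pvFillA_spec : ∀ (f : Nat) (p : Int × Int) (c pts : List (Int × Int)),
    p ∈ pts → p ∉ c → c.Nodup → pvM pts c < f →
    (c <+: pvFillA f p c pts) ∧ (pvFillA f p c pts).Nodup ∧ p ∈ pvFillA f p c pts ∧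
    (∀ x ∈ pvFillA f p c pts, x ∈ c ∨ pvReach pts p x) ∧
    (∀ x ∈ pvFillA f p c pts, x ∉ c → ∀ y, pvStep pts x y → y ∈ pvFillA f p c pts) := by
  intro f
  induction f with
  | zero => exact fun p c pts _ _ _ hm => absurd hm (Nat.not_lt_zero _)
  | succ f ihf =>
    intro p c pts hp hpc hnd hm
    have hstepns : ∀ n ∈ pts.filter (fun q => (q.1 - p.1).natAbs + (q.2 - p.2).natAbs == 1),
        pvStep pts p n := by
      intro n hn
      rw [List.mem_filter] at hn
      refine ⟨hn.1, ?_⟩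
      have h := hn.2
      unfold pvAdj
      exact beq_iff_eq.mp h
    have hinv1 : pvInv pts p c (c ++ [p]) := by
      refine ⟨?_, List.prefix_rfl, ?_, ?_⟩
      · exact (List.nodup_cons.2 ⟨hpc, hnd⟩).perm (List.perm_append_singleton p c).symm
      · intro x hx
        rcases List.mem_append.1 hx with hx | hx
        · exact Or.inl hx
        · exact Or.inr (by rw [List.mem_singleton.1 hx]; exact Relation.ReflTransGen.refl)
      · intro x hx hxc hxp
        rcases List.mem_append.1 hx with hx | hx
        · exact absurd hx hxc
        · exact absurd (List.mem_singleton.1 hx) hxp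
    obtain ⟨hpre', ⟨hnd', hpre'', hsound', hclosed'⟩, hmem'⟩ :=
      pvFillA_fold pts p c f hp hpc hm (fun p' c' => ihf p' c' pts)
        (pts.filter (fun q => (q.1 - p.1).natAbs + (q.2 - p.2).natAbs == 1)) (c ++ [p])
        hstepns hinv1
    have hres : pvFillA (f + 1) p c pts =
        (pts.filter (fun q => (q.1 - p.1).natAbs + (q.2 - p.2).natAbs == 1)).foldl
          (fun acc n => if n ∈ acc then acc else pvFillA f n acc pts) (c ++ [p]) := rfl
    rw [hres]
    refine ⟨(List.prefix_append c [p]).trans hpre', hnd',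
      hpre'.sublist.mem (by simp), hsound', ?_⟩
    intro x hx hxc y hy
    by_cases hxp : x = p
    · subst hxp
      apply hmem' y
      rw [List.mem_filter]
      exact ⟨hy.1, beq_iff_eq.mpr hy.2⟩
    · exact hclosed' x hx hxc hxp y hy

theorem pv_sublist_length_lt {α : Type} {l' l : List α} (h : List.Sublist l' l) {x : α}
    (hx : x ∈ l) (hx' : x ∉ l') : l'.length < l.length := by
  rcases Nat.lt_or_ge l'.length l.length with hlt | hge
  · exact hlt
  · exfalso
    exact hx' ((h.eq_of_length (Nat.le_antisymm h.length_le hge)) ▸ hx)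

-- terminal-state conclusions for pvBfsB
theorem pvBfsB_final {distinct comp rest : List (Int × Int)} {p : Int × Int}
    (hndc : comp.Nodup)
    (hsound : ∀ x ∈ comp, pvReach distinct p x)
    (hcov : ∀ x ∈ distinct, x ∈ comp ∨ x ∈ rest)
    (hclosed : ∀ q ∈ rest, ∀ r ∈ comp, ¬ pvAdj r q) :
    comp.Nodup ∧ (∀ x ∈ comp, x ∈ comp) ∧ (∀ x ∈ comp, pvReach distinct p x) ∧
    (∀ x ∈ distinct, x ∉ comp → ∀ r ∈ comp, ¬ pvAdj r x) := by
  refine ⟨hndc, fun x hx => hx, hsound, ?_⟩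
  intro x hxd hxc r hr
  rcases hcov x hxd with h | h
  · exact absurd h hxc
  · exact hclosed x h r hr

-- BFS (pvBfsB) correctness
theorem pvBfsB_spec : ∀ (f : Nat) (comp frontier rest distinct : List (Int × Int)) (p : Int × Int),
    rest.length + 2 ≤ f →
    comp.Nodup → rest.Nodup →
    (∀ x ∈ rest, x ∈ distinct) → (∀ x ∈ comp, x ∉ rest) →
    (∀ x ∈ frontier, x ∈ comp) →
    p ∈ comp →
    (∀ x ∈ comp, pvReach distinct p x) →
    (∀ q ∈ rest, ∀ r ∈ comp, r ∉ frontier → ¬ pvAdj r q) →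
    (∀ x ∈ distinct, x ∈ comp ∨ x ∈ rest) →
    (pvBfsB f comp frontier rest).Nodup ∧
    (∀ x ∈ comp, x ∈ pvBfsB f comp frontier rest) ∧
    (∀ x ∈ pvBfsB f comp frontier rest, pvReach distinct p x) ∧
    (∀ x ∈ distinct, x ∉ pvBfsB f comp frontier rest →
      ∀ r ∈ pvBfsB f comp frontier rest, ¬ pvAdj r x) := by
  intro f
  induction f with
  | zero => exact fun comp frontier rest distinct p hf => absurd hf (by omega)
  | succ f ihf =>
    intro comp frontier rest distinct p hf hndc hndr hrd hdisj hfc hpc hsound hI3 hcov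
    have hunf : pvBfsB (f + 1) comp frontier rest =
        if frontier.isEmpty then comp
        else pvBfsB f (comp ++ rest.filter (pvAdjAny frontier)) (rest.filter (pvAdjAny frontier))
          (rest.filter (fun q => !(decide (q ∈ rest.filter (pvAdjAny frontier))))) := rfl
    by_cases hfe : frontier.isEmpty
    · rw [hunf, if_pos hfe]
      have hfnil : frontier = [] := List.isEmpty_iff.1 hfe
      exact pvBfsB_final hndc hsound hcov
        (fun q hq r hr => hI3 q hq r hr (by rw [hfnil]; exact List.not_mem_nil))
    · rw [hunf, if_neg hfe]
      set nw := rest.filter (pvAdjAny frontier) with hnw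
      set rest' := rest.filter (fun q => !(decide (q ∈ nw))) with hrest'
      have hnwrest : ∀ x ∈ nw, x ∈ rest := fun x hx => (List.mem_filter.1 hx).1
      have hnwadj : ∀ x ∈ nw, ∃ r ∈ frontier, pvAdj r x := by
        intro x hx
        have := (List.mem_filter.1 hx).2
        unfold pvAdjAny at this
        rw [List.any_eq_true] at this
        obtain ⟨r, hr, hb⟩ := this
        exact ⟨r, hr, beq_iff_eq.mp hb⟩
      have hadjnw : ∀ x ∈ rest, ∀ r ∈ frontier, pvAdj r x → x ∈ nw := by
        intro x hx r hr hadj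
        rw [hnw, List.mem_filter]
        refine ⟨hx, ?_⟩
        unfold pvAdjAny
        rw [List.any_eq_true]
        exact ⟨r, hr, beq_iff_eq.mpr hadj⟩
      have hre'sub : List.Sublist rest' rest := List.filter_sublist
      -- invariants for the next state
      have hndc' : (comp ++ nw).Nodup := by
        rw [List.nodup_append]
        refine ⟨hndc, hndr.filter _, ?_⟩
        intro a ha b hb hab
        exact (hdisj a ha) (hab ▸ hnwrest b hb)
      have hndr' : rest'.Nodup := hndr.filter _
      have hrd' : ∀ x ∈ rest', x ∈ distinct := fun x hx => hrd x (hre'sub.mem hx)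
      have hdisj' : ∀ x ∈ comp ++ nw, x ∉ rest' := by
        intro x hx
        rcases List.mem_append.1 hx with hx | hx
        · exact fun h => (hdisj x hx) (hre'sub.mem h)
        · intro h
          have := (List.mem_filter.1 h).2
          simp [hx] at this
      have hfc' : ∀ x ∈ nw, x ∈ comp ++ nw := fun x hx => List.mem_append.2 (Or.inr hx)
      have hpc' : p ∈ comp ++ nw := List.mem_append.2 (Or.inl hpc)
      have hsound' : ∀ x ∈ comp ++ nw, pvReach distinct p x := by
        intro x hx
        rcases List.mem_append.1 hx with hx | hx
        · exact hsound x hx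
        · obtain ⟨r, hr, hadj⟩ := hnwadj x hx
          exact Relation.ReflTransGen.tail (hsound r (hfc r hr))
            ⟨hrd x (hnwrest x hx), hadj⟩
      have hI3' : ∀ q ∈ rest', ∀ r ∈ comp ++ nw, r ∉ nw → ¬ pvAdj r q := by
        intro q hq r hr hrnw hadj
        have hrc : r ∈ comp := by
          rcases List.mem_append.1 hr with h | h
          · exact h
          · exact absurd h hrnw
        by_cases hrf : r ∈ frontier
        · have hqrest : q ∈ rest := hre'sub.mem hq
          have : q ∈ nw := hadjnw q hqrest r hrf hadj
          have h2 := (List.mem_filter.1 hq).2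
          simp [this] at h2
        · exact hI3 q (hre'sub.mem hq) r hrc hrf hadj
      have hcov' : ∀ x ∈ distinct, x ∈ comp ++ nw ∨ x ∈ rest' := by
        intro x hx
        rcases hcov x hx with h | h
        · exact Or.inl (List.mem_append.2 (Or.inl h))
        · by_cases hxnw : x ∈ nw
          · exact Or.inl (List.mem_append.2 (Or.inr hxnw))
          · exact Or.inr (by rw [hrest', List.mem_filter]; simp [h, hxnw])
      by_cases hnwE : nw = []
      · -- empty layer: the next call returns comp at any fuel ≥ 1
        obtain ⟨f', rfl⟩ : ∃ f', f = f' + 1 := ⟨f - 1, by omega⟩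
        have hres : pvBfsB (f' + 1) (comp ++ nw) nw rest' = comp := by
          rw [hnwE]
          simp [pvBfsB]
        rw [hres]
        apply pvBfsB_final hndc hsound hcov
        intro q hq r hr hadj
        by_cases hrf : r ∈ frontier
        · have : q ∈ nw := hadjnw q hq r hrf hadj
          rw [hnwE] at this
          exact absurd this (List.not_mem_nil)
        · exact hI3 q hq r hr hrf hadj
      · obtain ⟨n, hnnw⟩ := List.exists_mem_of_ne_nil nw hnwE
        have hlt : rest'.length < rest.length :=
          pv_sublist_length_lt hre'sub (hnwrest n hnnw)
            (fun h => by have := (List.mem_filter.1 h).2; simp [hnnw] at this)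
        have hf' : rest'.length + 2 ≤ f := by omega
        obtain ⟨h1, h2, h3, h4⟩ := ihf (comp ++ nw) nw rest' distinct p hf' hndc' hndr'
          hrd' hdisj' hfc' hpc' hsound' hI3' hcov'
        exact ⟨h1, fun x hx => h2 x (List.mem_append.2 (Or.inl hx)), h3, h4⟩

-- characterisation of the two per-component lists
def pvConnA (pts : List (Int × Int)) (q : Int × Int) : List (Int × Int) :=
  pvFillA (pts.length + 1) q [] pts

theorem pvConnA_spec {pts : List (Int × Int)} {q : Int × Int} (hq : q ∈ pts) :
    (pvConnA pts q).Nodup ∧ (∀ x, x ∈ pvConnA pts q ↔ pvReach pts q x) := by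
  have hm : pvM pts [] < pts.length + 1 := by
    have : pvM pts [] ≤ pts.length := List.Sublist.length_le (List.filter_sublist)
    omega
  have h := pvFillA_spec (pts.length + 1) q [] pts hq (List.not_mem_nil) List.nodup_nil hm
  refine ⟨h.2.1, fun x => ⟨?_, ?_⟩⟩
  · intro hx
    rcases h.2.2.2.1 x hx with h' | h'
    · exact absurd h' (List.not_mem_nil)
    · exact h'
  · intro hr
    induction hr with
    | refl => exact h.2.2.1
    | tail h1 h2 ih => exact h.2.2.2.2 _ ih (List.not_mem_nil) _ h2

theorem pvCompB_spec {distinct : List (Int × Int)} {q : Int × Int}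
    (hnd : distinct.Nodup) (_hq : q ∈ distinct) :
    (pvCompB q distinct).Nodup ∧ (∀ x, x ∈ pvCompB q distinct ↔ pvReach distinct q x) := by
  have hqrest : q ∉ distinct.filter (fun x => !(decide (x = q))) := by
    intro h
    have := (List.mem_filter.1 h).2
    simp at this
  have h := pvBfsB_spec ((distinct.filter (fun x => !(decide (x = q)))).length + 2)
    [q] [q] (distinct.filter (fun x => !(decide (x = q)))) distinct q
    (le_refl _)
    (List.nodup_singleton q)
    (hnd.filter _)
    (fun x hx => (List.mem_filter.1 hx).1)
    (fun x hx => by rw [List.mem_singleton.1 hx]; exact hqrest)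
    (fun x hx => hx)
    (List.mem_singleton_self q)
    (fun x hx => by rw [List.mem_singleton.1 hx]; exact Relation.ReflTransGen.refl)
    (fun a ha r hr hrf => absurd hr hrf)
    (fun x hx => by
      by_cases hxq : x = q
      · exact Or.inl (by rw [hxq]; exact List.mem_singleton_self q)
      · exact Or.inr (List.mem_filter.2 ⟨hx, by simp [hxq]⟩))
  obtain ⟨h1, h2, h3, h4⟩ := h
  refine ⟨h1, fun x => ⟨h3 x, ?_⟩⟩
  intro hr
  induction hr with
  | refl => exact h2 q (List.mem_singleton_self q)
  | @tail b c h1' h2' ih =>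
    by_contra hc
    exact h4 c h2'.1 hc b ih h2'.2

-- component sizes
def pvLenA (pts : List (Int × Int)) (q : Int × Int) : Int := ((pvConnA pts q).length : Int)

theorem pvLen_eq_of_mem_conn {pts : List (Int × Int)} {q r : Int × Int}
    (hq : q ∈ pts) (hr : r ∈ pvConnA pts q) : pvLenA pts r = pvLenA pts q := by
  have hc := pvConnA_spec hq
  have hrq : pvReach pts q r := (hc.2 r).1 hr
  have hrp : r ∈ pts := by
    rcases pvReach_mem hrq with h | h
    · rwa [h]
    · exact h
  have hcr := pvConnA_spec hrp
  have hperm : (pvConnA pts r).Perm (pvConnA pts q) :=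
    (List.perm_ext_iff_of_nodup hcr.1 hc.1).2 (fun x => by
      rw [hcr.2 x, hc.2 x]
      constructor
      · exact fun h => Relation.ReflTransGen.trans hrq h
      · exact fun h => Relation.ReflTransGen.trans (pvReach_symm hq hrq) h)
  unfold pvLenA
  rw [hperm.length_eq]

theorem pvLenB_eq_lenA {pts : List (Int × Int)} {q : Int × Int} (hq : q ∈ pts) :
    ((pvCompB q (PySem.List.dedup pts)).length : Int) = pvLenA pts q := by
  have hnd := PySem.List.nodup_dedup pts
  have hqd : q ∈ PySem.List.dedup pts := (PySem.List.mem_dedup _ _).2 hq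
  have hb := pvCompB_spec hnd hqd
  have ha := pvConnA_spec hq
  have hperm : (pvCompB q (PySem.List.dedup pts)).Perm (pvConnA pts q) :=
    (List.perm_ext_iff_of_nodup hb.1 ha.1).2 (fun x => by
      rw [hb.2 x, ha.2 x]
      exact ⟨pvReach_congr (fun x => PySem.List.mem_dedup _ _),
        pvReach_congr (fun x => (PySem.List.mem_dedup _ _).symm)⟩)
  unfold pvLenA
  rw [hperm.length_eq]

-- folded minimum
def pvF (g : (Int × Int) → Int) (s : Int) (w : List (Int × Int)) : Int :=
  w.foldl (fun m q => min m (g q)) s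

theorem pvF_le_iff (g : (Int × Int) → Int) : ∀ (w : List (Int × Int)) (s t : Int),
    t ≤ pvF g s w ↔ t ≤ s ∧ ∀ q ∈ w, t ≤ g q := by
  intro w
  induction w with
  | nil => simp [pvF]
  | cons a l ih =>
    intro s t
    simp only [pvF, List.foldl_cons] at *
    rw [ih]
    constructor
    · rintro ⟨h1, h2⟩
      exact ⟨le_trans h1 (min_le_left _ _), by
        intro q hq
        rcases List.mem_cons.1 hq with rfl | hq
        · exact le_trans h1 (min_le_right _ _)
        · exact h2 q hq⟩
    · rintro ⟨h1, h2⟩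
      exact ⟨le_min h1 (h2 a (List.mem_cons_self)), fun q hq => h2 q (List.mem_cons_of_mem _ hq)⟩


-- the A-side removal fold
theorem pvRemoveFold_spec (conn : List (Int × Int)) : ∀ (l : List (Int × Int)),
    List.Sublist (conn.foldl (fun l p => if p ∈ l then (PySem.List.remove? l p).getD l else l) l) l ∧
    (∀ x ∈ l, x ∉ conn.foldl (fun l p => if p ∈ l then (PySem.List.remove? l p).getD l else l) l → x ∈ conn) := by
  induction conn with
  | nil => exact fun l => ⟨List.Sublist.refl l, fun x hx hx2 => absurd hx hx2⟩
  | cons a conn ih =>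
    intro l
    simp only [List.foldl_cons]
    set l1 := if a ∈ l then (PySem.List.remove? l a).getD l else l with hl1
    have hl1sub : List.Sublist l1 l := by
      rw [hl1]; split
      · next hmem => rw [PySem.List.remove?_eq_some_erase l a hmem]; exact List.erase_sublist
      · exact List.Sublist.refl l
    have hdrop : ∀ x ∈ l, x ∉ l1 → x = a := by
      intro x hx hx1
      rw [hl1] at hx1
      split at hx1
      · next hmem =>
        rw [PySem.List.remove?_eq_some_erase l a hmem, Option.getD_some] at hx1
        by_contra hne
        exact hx1 ((List.mem_erase_of_ne hne).2 hx)
      · exact absurd hx hx1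
    refine ⟨(ih l1).1.trans hl1sub, ?_⟩
    intro x hx hx2
    by_cases hxl1 : x ∈ l1
    · exact List.mem_cons_of_mem _ ((ih l1).2 x hxl1 hx2)
    · exact (hdrop x hx hxl1) ▸ List.mem_cons_self

theorem pvRemoveFold_lt {conn l : List (Int × Int)} {p : Int × Int}
    (hp : p ∈ conn) (hpl : p ∈ l) :
    (conn.foldl (fun l p => if p ∈ l then (PySem.List.remove? l p).getD l else l) l).length < l.length := by
  induction conn generalizing l with
  | nil => exact absurd hp (List.not_mem_nil)
  | cons a conn ih =>
    simp only [List.foldl_cons]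
    by_cases hal : a ∈ l
    · simp only [if_pos hal, PySem.List.remove?_eq_some_erase l a hal, Option.getD_some]
      calc (List.foldl (fun l p => if p ∈ l then (PySem.List.remove? l p).getD l else l) (l.erase a) conn).length
          ≤ (l.erase a).length := (pvRemoveFold_spec conn (l.erase a)).1.length_le
        _ < l.length := by
            rw [List.length_erase_of_mem hal]
            exact Nat.sub_lt (List.length_pos_of_mem hal) Nat.one_pos
    · rw [if_neg hal]
      rcases List.mem_cons.1 hp with rfl | hpc
      · exact absurd hpl hal
      · exact ih hpc hpl

-- the two loops compute the folded minimum of component sizes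
theorem pvLenB_class {pts : List (Int × Int)} {q r : Int × Int}
    (hq : q ∈ pts) (hr : r ∈ pvCompB q (PySem.List.dedup pts)) :
    ((pvCompB r (PySem.List.dedup pts)).length : Int) = ((pvCompB q (PySem.List.dedup pts)).length : Int) := by
  have hnd := PySem.List.nodup_dedup pts
  have hqd : q ∈ PySem.List.dedup pts := (PySem.List.mem_dedup _ _).2 hq
  have hreach : pvReach (PySem.List.dedup pts) q r := ((pvCompB_spec hnd hqd).2 r).1 hr
  have hrd : r ∈ PySem.List.dedup pts := by
    rcases pvReach_mem hreach with h | h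
    · rwa [h]
    · exact h
  have hrp : r ∈ pts := (PySem.List.mem_dedup _ _).1 hrd
  have hreachP : pvReach pts q r := pvReach_congr (fun x => PySem.List.mem_dedup _ _) hreach
  have hrc : r ∈ pvConnA pts q := ((pvConnA_spec hq).2 r).2 hreachP
  rw [pvLenB_eq_lenA hrp, pvLenB_eq_lenA hq]
  exact pvLen_eq_of_mem_conn hq hrc

theorem pvLoopA_eq (pts : List (Int × Int)) : ∀ (f : Nat) (s : Int) (ptc : List (Int × Int)),
    (∀ x ∈ ptc, x ∈ pts) → ptc.length ≤ f →
    pvLoopA f s ptc pts = pvF (pvLenA pts) s ptc := by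
  intro f
  induction f with
  | zero =>
    intro s ptc _ hlen
    rw [List.length_eq_zero_iff.1 (Nat.le_zero.1 hlen)]
    rfl
  | succ f ih =>
    intro s ptc hsub hlen
    match ptc with
    | [] => rfl
    | p0 :: rest =>
      have hp0 : p0 ∈ pts := hsub p0 List.mem_cons_self
      have hconn := pvConnA_spec hp0
      have hp0conn : p0 ∈ pvConnA pts p0 := ((hconn.2 p0).2 Relation.ReflTransGen.refl)
      simp only [pvLoopA]
      set conn := pvFillA (pts.length + 1) p0 [] pts with hconndef
      have hconnA : conn = pvConnA pts p0 := rfl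
      set g := fun (l : List (Int × Int)) (p : Int × Int) => if p ∈ l then (PySem.List.remove? l p).getD l else l with hg
      set ptc' := conn.foldl g (p0 :: rest) with hptc'
      have hfold := pvRemoveFold_spec conn (p0 :: rest)
      have hsub' : ∀ x ∈ ptc', x ∈ pts := fun x hx => hsub x (hfold.1.mem hx)
      have hlt : ptc'.length < (p0 :: rest).length :=
        pvRemoveFold_lt (hconnA ▸ hp0conn) List.mem_cons_self
      have hlen' : ptc'.length ≤ f := by
        have := hlen
        simp only [List.length_cons] at this
        omega
      rw [ih (min s (conn.length : Int)) ptc' hsub' hlen']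
      -- pvF g' (min s |conn|) ptc' = pvF g' s (p0 :: rest)
      have hgp0 : pvLenA pts p0 = (conn.length : Int) := by rw [hconnA]; rfl
      have hclass : ∀ q ∈ conn, pvLenA pts q = (conn.length : Int) := by
        intro q hq
        rw [← hgp0]
        exact pvLen_eq_of_mem_conn hp0 (hconnA ▸ hq)
      apply le_antisymm
      · have hself := (pvF_le_iff (pvLenA pts) ptc' (min s (conn.length : Int))
          (pvF (pvLenA pts) (min s (conn.length : Int)) ptc')).1 (le_refl _)
        apply (pvF_le_iff _ _ _ _).2
        refine ⟨le_trans hself.1 (min_le_left _ _), ?_⟩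
        intro q hq
        by_cases hq' : q ∈ ptc'
        · exact hself.2 q hq'
        · have hqconn : q ∈ conn := hfold.2 q hq hq'
          rw [hclass q hqconn]
          exact le_trans hself.1 (min_le_right _ _)
      · have hself := (pvF_le_iff (pvLenA pts) (p0 :: rest) s
          (pvF (pvLenA pts) s (p0 :: rest))).1 (le_refl _)
        apply (pvF_le_iff _ _ _ _).2
        refine ⟨le_min hself.1 (by rw [← hgp0]; exact hself.2 p0 List.mem_cons_self), ?_⟩
        intro q hq
        exact hself.2 q (hfold.1.mem hq)

theorem pvLoopB_eq (pts : List (Int × Int)) : ∀ (f : Nat) (s : Int) (rem : List (Int × Int)),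
    (∀ x ∈ rem, x ∈ pts) → rem.length ≤ f →
    pvLoopB f s rem (PySem.List.dedup pts) =
      pvF (fun q => ((pvCompB q (PySem.List.dedup pts)).length : Int)) s rem := by
  intro f
  induction f with
  | zero =>
    intro s rem _ hlen
    rw [List.length_eq_zero_iff.1 (Nat.le_zero.1 hlen)]
    rfl
  | succ f ih =>
    intro s rem hsub hlen
    match rem with
    | [] => rfl
    | p0 :: rest =>
      set gB := fun q => ((pvCompB q (PySem.List.dedup pts)).length : Int) with hgB
      have hp0 : p0 ∈ pts := hsub p0 List.mem_cons_self
      have hnd := PySem.List.nodup_dedup pts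
      have hp0d : p0 ∈ PySem.List.dedup pts := (PySem.List.mem_dedup _ _).2 hp0
      have hcomp := pvCompB_spec hnd hp0d
      have hp0c : p0 ∈ pvCompB p0 (PySem.List.dedup pts) :=
        (hcomp.2 p0).2 Relation.ReflTransGen.refl
      simp only [pvLoopB]
      set comp := pvCompB p0 (PySem.List.dedup pts) with hcompdef
      set rem' := (p0 :: rest).filter (fun q => !(decide (q ∈ comp))) with hrem'
      have hfsub : List.Sublist rem' (p0 :: rest) := List.filter_sublist
      have hsub' : ∀ x ∈ rem', x ∈ pts := fun x hx => hsub x (hfsub.mem hx)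
      have hp0drop : p0 ∉ rem' := by
        rw [hrem']
        simp only [List.mem_filter]
        rintro ⟨-, h⟩
        simp [hp0c] at h
      have hlt : rem'.length < (p0 :: rest).length :=
        pv_sublist_length_lt hfsub List.mem_cons_self hp0drop
      have hlen' : rem'.length ≤ f := by
        have := hlen
        simp only [List.length_cons] at this
        omega
      rw [ih (min s (comp.length : Int)) rem' hsub' hlen']
      have hclass : ∀ q ∈ comp, gB q = (comp.length : Int) := by
        intro q hq
        exact pvLenB_class hp0 hq
      apply le_antisymm
      · have hself := (pvF_le_iff gB rem' (min s (comp.length : Int))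
          (pvF gB (min s (comp.length : Int)) rem')).1 (le_refl _)
        apply (pvF_le_iff _ _ _ _).2
        refine ⟨le_trans hself.1 (min_le_left _ _), ?_⟩
        intro q hq
        by_cases hq' : q ∈ rem'
        · exact hself.2 q hq'
        · have hqcomp : q ∈ comp := by
            by_contra hqc
            exact hq' (by rw [hrem']; exact List.mem_filter.2 ⟨hq, by simp [hqc]⟩)
          rw [hclass q hqcomp]
          exact le_trans hself.1 (min_le_right _ _)
      · have hself := (pvF_le_iff gB (p0 :: rest) s
          (pvF gB s (p0 :: rest))).1 (le_refl _)
        apply (pvF_le_iff _ _ _ _).2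
        refine ⟨le_min hself.1 (hself.2 p0 List.mem_cons_self), ?_⟩
        intro q hq
        exact hself.2 q (hfsub.mem hq)

-- ===== VERDICT (by name: the statement is the Claim_ definition above) =====
theorem smallest_continuous_area_spec : Claim_equal_smallest_continuous_area := by
  intro points _
  unfold Spec_smallest_continuous_area smallest_continuous_area smallest_continuous_area_alt
  rw [pvLoopA_eq points points.length (points.length : Int) points (fun x hx => hx) (le_refl _)]
  rw [pvLoopB_eq points (PySem.List.dedup points).length (points.length : Int)
      (PySem.List.dedup points) (fun x hx => (PySem.List.mem_dedup _ _).1 hx) (le_refl _)]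
  apply le_antisymm
  · have hself := (pvF_le_iff (pvLenA points) points (points.length : Int)
      (pvF (pvLenA points) (points.length : Int) points)).1 (le_refl _)
    apply (pvF_le_iff _ _ _ _).2
    refine ⟨hself.1, ?_⟩
    intro q hq
    have hqp : q ∈ points := (PySem.List.mem_dedup _ _).1 hq
    rw [pvLenB_eq_lenA hqp]
    exact hself.2 q hqp
  · have hself := (pvF_le_iff (fun q => ((pvCompB q (PySem.List.dedup points)).length : Int))
      (PySem.List.dedup points) (points.length : Int)
      (pvF (fun q => ((pvCompB q (PySem.List.dedup points)).length : Int)) (points.length : Int)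
        (PySem.List.dedup points))).1 (le_refl _)
    apply (pvF_le_iff _ _ _ _).2
    refine ⟨hself.1, ?_⟩
    intro q hq
    rw [← pvLenB_eq_lenA hq]
    exact hself.2 q ((PySem.List.mem_dedup _ _).2 hq)
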